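-- pv_equiv track=rewrite | github.com/SaiHarsha9992/Geeks-for-Geeks | School/Program to print reciprocal of letters/program-to-print-reciprocal-of-letters.py | reciprocalString
-- ===== SOURCE A (Python) =====
-- def reciprocalString(S):
--     # code here
--     final_str = ''
--     for ch in S:
--         if ch.isupper():
--             final_str += chr(ord('Z') + ord('A') - ord(ch))
--         elif ch.islower():
--             final_str += chr(ord('z') + ord('a') - ord(ch))
--         else:
--             final_str += ch
--     return final_str
-- ===== SOURCE B (Python) =====
-- def reciprocalString(S):
--     table = {c: ord('Z') + ord('A') - c for c in range(ord('A'), ord('Z') + 1)}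
--     table.update({c: ord('z') + ord('a') - c for c in range(ord('a'), ord('z') + 1)})
--     return S.translate(table)
-- ===== Notes on version B (the rewrite author's own statement) =====
-- stated objective: idiomatic
-- what changed: Replaces the per-character isupper/islower branching accumulation loop with a precomputed 52-entry translation table applied once via str.translate.
import Mathlib
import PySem

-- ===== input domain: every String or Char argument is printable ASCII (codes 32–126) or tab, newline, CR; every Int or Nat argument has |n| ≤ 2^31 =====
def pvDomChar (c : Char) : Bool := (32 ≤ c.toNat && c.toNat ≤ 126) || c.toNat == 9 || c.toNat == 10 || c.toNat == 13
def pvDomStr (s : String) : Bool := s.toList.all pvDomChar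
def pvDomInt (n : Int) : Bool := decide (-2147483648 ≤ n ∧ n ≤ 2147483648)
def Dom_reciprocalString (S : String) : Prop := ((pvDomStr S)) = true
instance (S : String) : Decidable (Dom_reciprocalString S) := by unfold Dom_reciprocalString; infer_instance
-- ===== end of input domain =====

-- B replaces A's per-character isupper/islower branching loop with one precomputed
-- 52-entry translation table (dict) applied in a single translate pass (idiomatic).

-- ===== PORT A =====
def reciprocalString (S : String) : String :=
  String.mk (S.toList.foldl (fun acc ch =>
    if PySem.Chars.isupper ch then acc ++ [Char.ofNat (0x5A + 0x41 - ch.toNat)]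
    else if PySem.Chars.islower ch then acc ++ [Char.ofNat (0x7A + 0x61 - ch.toNat)]
    else acc ++ [ch]) [])

-- ===== PORT B =====
-- the translation table: uppercase entries first, then table.update with the lowercase ones
def pvReciprocalTable : PySem.Dict Int Int :=
  (PySem.List.pyRange 0x61 (0x7A + 1) 1).foldl (fun d c => d.insert c (0x7A + 0x61 - c))
    ((PySem.List.pyRange 0x41 (0x5A + 1) 1).foldl (fun d c => d.insert c (0x5A + 0x41 - c))
      PySem.Dict.empty)

-- S.translate(table): each code point absent from the table is kept unchanged
def reciprocalString_alt (S : String) : String :=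
  String.mk (S.toList.map (fun ch =>
    match pvReciprocalTable.get? (ch.toNat : Int) with
    | some v => Char.ofNat v.toNat
    | none => ch))

-- ===== PRECONDITION & SPEC =====
def Spec_reciprocalString (S : String) (out : String) : Prop := out = reciprocalString_alt S
instance (S : String) (out : String) : Decidable (Spec_reciprocalString S out) := by unfold Spec_reciprocalString; infer_instance

-- ===== CLAIM (what is proved, stated in full; the proofs are below) =====
def Claim_equal_reciprocalString : Prop := ∀ (S : String), Dom_reciprocalString S → Spec_reciprocalString S (reciprocalString S)

-- ===== LEMMAS AND PROOFS =====

set_option maxRecDepth 8192 in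
lemma pv_char_eq (c : Char) (h : pvDomChar c = true) :
    (if PySem.Chars.isupper c then Char.ofNat (0x5A + 0x41 - c.toNat)
     else if PySem.Chars.islower c then Char.ofNat (0x7A + 0x61 - c.toNat)
     else c)
    = match pvReciprocalTable.get? (c.toNat : Int) with
      | some v => Char.ofNat v.toNat
      | none => c := by
  have h126 : c.toNat ≤ 126 := by
    simp [pvDomChar] at h
    omega
  have hc : c = Char.ofNat c.toNat := (Char.ofNat_toNat c).symm
  rw [hc]
  generalize c.toNat = n at h126 ⊢
  interval_cases n <;> decide

lemma pv_fold_eq (l : List Char) (h : l.all pvDomChar = true) (acc : List Char) :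
    l.foldl (fun acc ch =>
      if PySem.Chars.isupper ch then acc ++ [Char.ofNat (0x5A + 0x41 - ch.toNat)]
      else if PySem.Chars.islower ch then acc ++ [Char.ofNat (0x7A + 0x61 - ch.toNat)]
      else acc ++ [ch]) acc
    = acc ++ l.map (fun ch =>
        match pvReciprocalTable.get? (ch.toNat : Int) with
        | some v => Char.ofNat v.toNat
        | none => ch) := by
  induction l generalizing acc with
  | nil => simp
  | cons c t ih =>
    simp only [List.all_cons, Bool.and_eq_true] at h
    rw [List.foldl_cons, ih h.2, List.map_cons]
    have hstep : (if PySem.Chars.isupper c then acc ++ [Char.ofNat (0x5A + 0x41 - c.toNat)]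
        else if PySem.Chars.islower c then acc ++ [Char.ofNat (0x7A + 0x61 - c.toNat)]
        else acc ++ [c])
        = acc ++ [(if PySem.Chars.isupper c then Char.ofNat (0x5A + 0x41 - c.toNat)
          else if PySem.Chars.islower c then Char.ofNat (0x7A + 0x61 - c.toNat)
          else c)] := by
      split_ifs <;> rfl
    rw [hstep, pv_char_eq c h.1]
    simp

-- ===== VERDICT (by name: the statement is the Claim_ definition above) =====
set_option maxRecDepth 8192 in
theorem reciprocalString_spec : Claim_equal_reciprocalString := by
  intro S h
  unfold Spec_reciprocalString reciprocalString reciprocalString_alt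
  have := pv_fold_eq S.toList (by exact h) []
  rw [this]
  rfl
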